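-- pv_equiv track=rewrite | github.com/LiamDemb/surf-rag | src/surf_rag/benchmark/extract_nq.py | _span_to_char
-- ===== SOURCE A (Python) =====
-- from typing import Any, Dict, List, Optional, Sequence, Tuple
--
-- def _span_to_char(
--     span: Tuple[int, int],
--     token_to_char: Dict[int, Tuple[int, int]],
-- ) -> Optional[Tuple[int, int, int, int]]:
--     st, et = span
--     first_idx = None
--     first_char = None
--     last_idx = None
--     last_char = None
--     for idx in range(st, et + 1):
--         char_span = token_to_char.get(idx)
--         if char_span is None:
--             continue
--         if first_idx is None:
--             first_idx = idx
--             first_char = char_span[0]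
--         last_idx = idx
--         last_char = char_span[1]
--     if first_idx is None or first_char is None or last_idx is None or last_char is None:
--         return None
--     return (first_idx, last_idx, first_char, last_char)
-- ===== SOURCE B (Python) =====
-- def _span_to_char(span, token_to_char):
--     st, et = span
--     first = None
--     for idx in range(st, et + 1):
--         cs = token_to_char.get(idx)
--         if cs is not None:
--             first = (idx, cs[0])
--             break
--     if first is None:
--         return None
--     for idx in reversed(range(st, et + 1)):
--         cs = token_to_char.get(idx)
--         if cs is not None:
--             return (first[0], idx, first[1], cs[1])
--     return None  # unreachable: the forward scan already found a mapped index
-- ===== Notes on version B (the rewrite author's own statement) =====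
-- stated objective: alternative
-- what changed: Replaces the single accumulating pass over the whole range (tracking four Optional cells) with two early-exit scans: a forward scan for the first mapped index/char-start and a backward scan for the last mapped index/char-end.
import Mathlib
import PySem

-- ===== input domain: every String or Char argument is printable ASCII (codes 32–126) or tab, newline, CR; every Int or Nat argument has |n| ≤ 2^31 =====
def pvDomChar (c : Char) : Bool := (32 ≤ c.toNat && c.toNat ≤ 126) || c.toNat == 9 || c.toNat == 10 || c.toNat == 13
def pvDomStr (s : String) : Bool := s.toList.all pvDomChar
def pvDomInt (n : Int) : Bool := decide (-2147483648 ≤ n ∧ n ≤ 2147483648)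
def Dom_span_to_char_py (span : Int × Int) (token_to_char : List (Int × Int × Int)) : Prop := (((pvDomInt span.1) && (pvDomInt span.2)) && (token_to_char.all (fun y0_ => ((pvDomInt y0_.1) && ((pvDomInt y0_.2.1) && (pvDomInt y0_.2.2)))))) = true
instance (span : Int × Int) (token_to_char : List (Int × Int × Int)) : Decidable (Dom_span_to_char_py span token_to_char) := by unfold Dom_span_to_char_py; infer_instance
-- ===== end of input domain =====

-- B replaces A's single accumulating pass (four Optional cells updated over the whole range)
-- with two early-exit scans: forward for the first mapped index, backward for the last.

-- ===== PORT A =====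
-- A-side helper: the literal body of A's for-loop, as one fold step over the state
-- (first_idx, first_char, last_idx, last_char)
def pvStepA (d : PySem.Dict Int (Int × Int)) (acc : Option Int × Option Int × Option Int × Option Int) (idx : Int) : Option Int × Option Int × Option Int × Option Int :=
  match PySem.Dict.get? d idx with
  | none => acc
  | some cs =>
    match acc with
    | (none, _, _, _) => (some idx, some cs.1, some idx, some cs.2)
    | (some fi, fc, _, _) => (some fi, fc, some idx, some cs.2)

-- literal transliteration: one fold over range(st, et+1) carrying the four cells, then the None check.
def span_to_char_py (span : Int × Int) (token_to_char : List (Int × Int × Int)) : Option (Int × Int × Int × Int) :=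
  let st := span.1
  let et := span.2
  let d := PySem.Dict.mk token_to_char
  let s := (PySem.List.pyRange st (et + 1) 1).foldl (pvStepA d) (none, none, none, none)
  match s with
  | (some fi, some fc, some li, some lc) => some (fi, li, fc, lc)
  | _ => none

-- ===== PORT B =====
-- forward loop with break: first mapped idx and its char-start
def pvScanFwd (d : PySem.Dict Int (Int × Int)) : List Int → Option (Int × Int)
  | [] => none
  | i :: rest =>
    match PySem.Dict.get? d i with
    | some cs => some (i, cs.1)
    | none => pvScanFwd d rest

-- backward loop (over reversed(range(...))) with return: last mapped idx and its char-end
def pvScanBwd (d : PySem.Dict Int (Int × Int)) : List Int → Option (Int × Int)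
  | [] => none
  | i :: rest =>
    match PySem.Dict.get? d i with
    | some cs => some (i, cs.2)
    | none => pvScanBwd d rest

def span_to_char_py_alt (span : Int × Int) (token_to_char : List (Int × Int × Int)) : Option (Int × Int × Int × Int) :=
  let st := span.1
  let et := span.2
  let d := PySem.Dict.mk token_to_char
  match pvScanFwd d (PySem.List.pyRange st (et + 1) 1) with
  | none => none
  | some (fi, fc) =>
    match pvScanBwd d (PySem.List.pyRange st (et + 1) 1).reverse with
    | none => none  -- unreachable: the forward scan already found a mapped index
    | some (li, lc) => some (fi, li, fc, lc)

-- ===== PRECONDITION & SPEC =====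
def Spec_span_to_char_py (span : Int × Int) (token_to_char : List (Int × Int × Int)) (out : Option (Int × Int × Int × Int)) : Prop := out = span_to_char_py_alt span token_to_char
instance (span : Int × Int) (token_to_char : List (Int × Int × Int)) (out : Option (Int × Int × Int × Int)) : Decidable (Spec_span_to_char_py span token_to_char out) := by unfold Spec_span_to_char_py; infer_instance

-- ===== CLAIM (what is proved, stated in full; the proofs are below) =====
def Claim_equal_span_to_char_py : Prop := ∀ (span : Int × Int) (token_to_char : List (Int × Int × Int)), Dom_span_to_char_py span token_to_char → Spec_span_to_char_py span token_to_char (span_to_char_py span token_to_char)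

-- ===== LEMMAS AND PROOFS =====

theorem pvScanBwd_append (d : PySem.Dict Int (Int × Int)) (xs ys : List Int) :
    pvScanBwd d (xs ++ ys) = (match pvScanBwd d xs with
      | some r => some r
      | none => pvScanBwd d ys) := by
  induction xs with
  | nil => simp [pvScanBwd]
  | cons i rest ih =>
    simp only [List.cons_append, pvScanBwd]
    cases PySem.Dict.get? d i <;> simp [ih]

-- once first_idx is set, the fold only updates the last two cells,
-- and they become the first hit of the reversed remaining list
theorem pvFold_some (d : PySem.Dict Int (Int × Int)) (l : List Int)
    (fi : Int) (fc li0 lc0 : Option Int) :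
    l.foldl (pvStepA d) (some fi, fc, li0, lc0) =
      (match pvScanBwd d l.reverse with
        | none => (some fi, fc, li0, lc0)
        | some (li, lc) => (some fi, fc, some li, some lc)) := by
  induction l generalizing li0 lc0 with
  | nil => simp [pvScanBwd]
  | cons i rest ih =>
    simp only [List.foldl_cons, List.reverse_cons, pvScanBwd_append]
    rcases h : PySem.Dict.get? d i with _ | cs <;>
      simp [pvStepA, h, ih, pvScanBwd] <;>
      rcases pvScanBwd d rest.reverse with _ | ⟨li, lc⟩ <;> simp

-- characterisation of A's full fold by the two scans of B
theorem pvFold_none (d : PySem.Dict Int (Int × Int)) (l : List Int) :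
    l.foldl (pvStepA d) (none, none, none, none) =
      (match pvScanFwd d l, pvScanBwd d l.reverse with
        | some (fi, fc), some (li, lc) => (some fi, some fc, some li, some lc)
        | _, _ => (none, none, none, none)) := by
  induction l with
  | nil => simp [pvScanFwd, pvScanBwd]
  | cons i rest ih =>
    rcases h : PySem.Dict.get? d i with _ | cs
    · simp only [List.foldl_cons, List.reverse_cons, pvScanBwd_append, pvScanFwd, pvScanBwd,
        pvStepA, h]
      rw [ih]
      rcases pvScanFwd d rest with _ | ⟨fi, fc⟩ <;>
        rcases pvScanBwd d rest.reverse with _ | ⟨li, lc⟩ <;> simp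
    · simp only [List.foldl_cons, List.reverse_cons, pvScanBwd_append, pvScanFwd, pvScanBwd,
        pvStepA, h]
      rw [pvFold_some]
      rcases pvScanBwd d rest.reverse with _ | ⟨li, lc⟩ <;> simp

-- ===== VERDICT (by name: the statement is the Claim_ definition above) =====
theorem span_to_char_py_spec : Claim_equal_span_to_char_py := by
  intro span token_to_char _
  show span_to_char_py span token_to_char = span_to_char_py_alt span token_to_char
  simp only [span_to_char_py, span_to_char_py_alt]
  rw [pvFold_none]
  rcases pvScanFwd (PySem.Dict.mk token_to_char) (PySem.List.pyRange span.1 (span.2 + 1) 1) with _ | ⟨fi, fc⟩ <;>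
    rcases pvScanBwd (PySem.Dict.mk token_to_char) (PySem.List.pyRange span.1 (span.2 + 1) 1).reverse with _ | ⟨li, lc⟩ <;>
    simp
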